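-- pv_equiv track=rewrite | github.com/owen-rpx/agira | app.py | get_x_axis
-- ===== SOURCE A (Python) =====
-- def get_x_axis(data_list):
--     x_axis = []
--     for data in data_list:
--         x = list(data.keys())
--         for xx in x:
--             if xx not in x_axis:
--                 x_axis.append(xx)
--     x_axis.sort()
--     return x_axis
-- ===== SOURCE B (Python) =====
-- def get_x_axis(data_list):
--     keys = []
--     for data in data_list:
--         keys.extend(data.keys())
--     keys.sort()
--     result = []
--     for k in keys:
--         if not result or result[-1] != k:
--             result.append(k)
--     return result
-- ===== Notes on version B (the rewrite author's own statement) =====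
-- stated objective: faster
-- what changed: A dedups first with a quadratic 'not in' membership scan on the growing result and then sorts; B concatenates all keys, sorts once, and removes duplicates in a single adjacent-comparison pass over the sorted list.
import Mathlib
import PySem

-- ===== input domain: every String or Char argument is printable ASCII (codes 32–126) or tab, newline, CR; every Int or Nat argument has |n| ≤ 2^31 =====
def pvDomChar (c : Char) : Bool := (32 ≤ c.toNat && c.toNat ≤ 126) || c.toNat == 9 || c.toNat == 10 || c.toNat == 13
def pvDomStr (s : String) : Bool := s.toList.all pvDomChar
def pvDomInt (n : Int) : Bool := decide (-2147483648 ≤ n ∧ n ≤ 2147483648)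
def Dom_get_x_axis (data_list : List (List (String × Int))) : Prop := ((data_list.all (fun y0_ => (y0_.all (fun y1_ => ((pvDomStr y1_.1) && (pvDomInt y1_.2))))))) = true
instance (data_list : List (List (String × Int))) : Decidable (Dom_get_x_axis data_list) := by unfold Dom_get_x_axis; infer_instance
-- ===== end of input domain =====

-- B collects every dict's keys into one flat list, sorts it once, and drops duplicates
-- in a single adjacent-comparison pass, instead of A's membership-scan dedup followed by a sort.

-- ===== PORT A =====
def get_x_axis (data_list : List (List (String × Int))) : List String :=
  let x_axis : List String := data_list.foldl (fun x_axis data =>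
    let x := (PySem.Dict.ofList data).keys
    x.foldl (fun x_axis xx => if xx ∈ x_axis then x_axis else x_axis ++ [xx]) x_axis) []
  PySem.List.sorted x_axis (fun x => x) false

-- ===== PORT B =====
def get_x_axis_alt (data_list : List (List (String × Int))) : List String :=
  let keys : List String := data_list.foldl (fun keys data => keys ++ (PySem.Dict.ofList data).keys) []
  let skeys := PySem.List.sorted keys (fun x => x) false
  skeys.foldl (fun result k =>
    if result = [] ∨ result.getLast? ≠ some k then result ++ [k] else result) []

-- ===== PRECONDITION & SPEC =====
def Spec_get_x_axis (data_list : List (List (String × Int))) (out : List String) : Prop := out = get_x_axis_alt data_list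
instance (data_list : List (List (String × Int))) (out : List String) : Decidable (Spec_get_x_axis data_list out) := by unfold Spec_get_x_axis; infer_instance

-- ===== CLAIM (what is proved, stated in full; the proofs are below) =====
def Claim_equal_get_x_axis : Prop := ∀ (data_list : List (List (String × Int))), Dom_get_x_axis data_list → Spec_get_x_axis data_list (get_x_axis data_list)

-- ===== LEMMAS AND PROOFS =====

-- A's inner membership-scan loop is exactly PySem.Set.update.
theorem pv_step_eq (ks : List String) (s : List String) :
    ks.foldl (fun x_axis xx => if xx ∈ x_axis then x_axis else x_axis ++ [xx]) s
      = PySem.Set.update s ks := by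
  induction ks generalizing s with
  | nil => rfl
  | cons k ks ih =>
    rw [List.foldl_cons]
    have h : (if k ∈ s then s else s ++ [k]) = PySem.Set.add s k := by
      simp [PySem.Set.add, PySem.Set.contains]
    rw [h]
    exact ih (PySem.Set.add s k)

-- A's outer loop accumulates Set.update over the concatenation of all key lists.
theorem pv_outer_eq (l : List (List (String × Int))) (s : List String) :
    l.foldl (fun acc d => PySem.Set.update acc (PySem.Dict.ofList d).keys) s
      = PySem.Set.update s (l.flatMap (fun d => (PySem.Dict.ofList d).keys)) := by
  induction l generalizing s with
  | nil => rfl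
  | cons d l ih =>
    simp only [List.foldl_cons, List.flatMap_cons, PySem.Set.update_append, ih]

-- Invariant of B's adjacent-dedup pass over a ≤-sorted list.
theorem pv_dedup_fold (S : List String) :
    ∀ (acc : List String), S.Pairwise (· ≤ ·) → acc.Pairwise (· < ·) →
    (∀ a ∈ acc, ∀ s ∈ S, a ≤ s) →
    (∀ a ∈ acc, ∀ la, acc.getLast? = some la → a ≤ la) →
    (List.Pairwise (· < ·)
        (S.foldl (fun result k => if result = [] ∨ result.getLast? ≠ some k then result ++ [k] else result) acc)
      ∧ ∀ x, x ∈ S.foldl (fun result k => if result = [] ∨ result.getLast? ≠ some k then result ++ [k] else result) acc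
          ↔ x ∈ acc ∨ x ∈ S) := by
  induction S with
  | nil => intro acc _ h2 _ _; exact ⟨h2, by simp⟩
  | cons s S ih =>
    intro acc hS hlt hle hlast
    rw [List.pairwise_cons] at hS
    obtain ⟨hsS, hS'⟩ := hS
    simp only [List.foldl_cons]
    by_cases hcond : acc = [] ∨ acc.getLast? ≠ some s
    · rw [if_pos hcond]
      have hstrict : ∀ a ∈ acc, a < s := by
        intro a ha
        rcases lt_or_eq_of_le (hle a ha s (by simp)) with h | h
        · exact h
        · exfalso
          rcases hcond with h0 | hne
          · rw [h0] at ha; simp at ha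
          · have hne' : acc ≠ [] := by rintro rfl; simp at ha
            obtain ⟨la, hla⟩ := Option.isSome_iff_exists.mp (List.getLast?_isSome.mpr hne')
            have hal : a ≤ la := hlast a ha la hla
            have hls : la ≤ s := hle la (List.mem_of_getLast? hla) s (by simp)
            have : la = s := le_antisymm hls (h ▸ hal)
            exact hne (this ▸ hla)
      have hlt' : (acc ++ [s]).Pairwise (· < ·) := by
        rw [List.pairwise_append]
        exact ⟨hlt, by simp, fun a ha b hb => by simp at hb; exact hb ▸ hstrict a ha⟩
      have hle' : ∀ a ∈ acc ++ [s], ∀ t ∈ S, a ≤ t := by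
        intro a ha t ht
        rcases List.mem_append.mp ha with h | h
        · exact hle a h t (List.mem_cons_of_mem _ ht)
        · simp at h; exact h ▸ hsS t ht
      have hlast' : ∀ a ∈ acc ++ [s], ∀ la, (acc ++ [s]).getLast? = some la → a ≤ la := by
        intro a ha la hla
        rw [List.getLast?_concat] at hla
        cases hla
        rcases List.mem_append.mp ha with h | h
        · exact le_of_lt (hstrict a h)
        · simp at h; exact h ▸ le_refl _
      obtain ⟨p1, p2⟩ := ih (acc ++ [s]) hS' hlt' hle' hlast'
      refine ⟨p1, fun x => ?_⟩
      rw [p2 x]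
      simp only [List.mem_append, List.mem_cons]
      tauto
    · rw [if_neg hcond]
      obtain ⟨hne, hlaeq⟩ := not_or.mp hcond
      rw [not_not] at hlaeq
      have hsmem : s ∈ acc := List.mem_of_getLast? hlaeq
      have hle' : ∀ a ∈ acc, ∀ t ∈ S, a ≤ t := fun a ha t ht => hle a ha t (List.mem_cons_of_mem _ ht)
      obtain ⟨p1, p2⟩ := ih acc hS' hlt hle' hlast
      refine ⟨p1, fun x => ?_⟩
      rw [p2 x]
      simp only [List.mem_cons]
      constructor
      · tauto
      · rintro (h | rfl | h)
        · exact Or.inl h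
        · exact Or.inl hsmem
        · exact Or.inr h

-- ===== VERDICT (by name: the statement is the Claim_ definition above) =====
theorem get_x_axis_spec : Claim_equal_get_x_axis := by
  intro data_list _
  unfold Spec_get_x_axis get_x_axis get_x_axis_alt
  simp only [pv_step_eq, pv_outer_eq, PySem.Set.update_nil_left,
    PySem.List.foldl_append_eq_flatMap, List.nil_append]
  set flat := data_list.flatMap (fun d => (PySem.Dict.ofList d).keys) with hflat
  set S := PySem.List.sorted flat (fun x => x) false with hS
  have hSpw : S.Pairwise (· ≤ ·) := PySem.List.sorted_pairwise flat (fun x => x)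
  obtain ⟨p1, p2⟩ := pv_dedup_fold S [] hSpw (by simp) (by simp) (by simp)
  set R := S.foldl (fun result k => if result = [] ∨ result.getLast? ≠ some k then result ++ [k] else result) [] with hR
  have hnodup : R.Nodup := p1.imp ne_of_lt
  have hperm : R.Perm (PySem.Set.ofList flat) := by
    rw [List.perm_ext_iff_of_nodup hnodup (PySem.Set.nodup_ofList flat)]
    intro x
    rw [p2 x, PySem.Set.mem_ofList]
    simp [hS, PySem.List.mem_sorted]
  exact PySem.List.sorted_eq_of_perm_of_pairwise_lt _ R (fun x => x) hperm p1
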